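-- pv_equiv track=rewrite | github.com/bouyang/pythonCSP | DSA small problems/two_pointers/7_check_triple_match.py | checkTripleMatch
-- ===== SOURCE A (Python) =====
-- def checkTripleMatch(nums):
--     result = {}
--
--     for num in nums:
--         if result.get(num):
--             return True
--         else:
--             result[num * 3] = True
--
--     return False
-- ===== SOURCE B (Python) =====
-- def checkTripleMatch(nums):
--     items = list(nums)
--     n = len(items)
--     for j in range(n):
--         for i in range(j):
--             if items[j] == 3 * items[i]:
--                 return True
--     return False
-- ===== Notes on version B (the rewrite author's own statement) =====
-- stated objective: alternative
-- what changed: Replaced the single pass that maintains a dict of tripled seen values with a plain nested index double loop checking items[j] == 3*items[i] for every i < j.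
import Mathlib
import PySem

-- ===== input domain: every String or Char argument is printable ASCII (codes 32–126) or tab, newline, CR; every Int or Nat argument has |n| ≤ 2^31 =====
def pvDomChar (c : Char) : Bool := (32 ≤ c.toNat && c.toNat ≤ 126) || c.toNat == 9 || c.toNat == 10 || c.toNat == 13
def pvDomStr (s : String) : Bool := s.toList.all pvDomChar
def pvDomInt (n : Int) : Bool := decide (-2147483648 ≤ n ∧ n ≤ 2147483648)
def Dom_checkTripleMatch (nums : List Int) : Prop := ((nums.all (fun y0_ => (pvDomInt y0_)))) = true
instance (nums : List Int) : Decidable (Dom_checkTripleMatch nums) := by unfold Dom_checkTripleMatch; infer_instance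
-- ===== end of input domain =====

-- B replaces A's dict-of-tripled-values single pass by a nested index double scan (alternative decomposition, same results).

-- ===== PORT A =====
-- loop over nums carrying the dict 'result'; 'if result.get(num):' is a truthiness test (values are only True)
def checkTripleMatchGo (result : PySem.Dict Int Bool) : List Int → Bool
  | [] => false
  | num :: rest =>
      if result.getD num false then true
      else checkTripleMatchGo (result.insert (num * 3) true) rest

def checkTripleMatch (nums : List Int) : Bool :=
  checkTripleMatchGo PySem.Dict.empty nums

-- ===== PORT B =====
-- nested double loop over indices; 'items[j]' is in range, so pyGetD with a dummy default is exact
def checkTripleMatch_alt (nums : List Int) : Bool :=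
  let items := nums
  let n : Int := items.length
  (PySem.List.pyRange 0 n 1).any (fun j =>
    (PySem.List.pyRange 0 j 1).any (fun i =>
      PySem.List.pyGetD items j 0 == 3 * PySem.List.pyGetD items i 0))

-- ===== PRECONDITION & SPEC =====
def Spec_checkTripleMatch (nums : List Int) (out : Bool) : Prop := out = checkTripleMatch_alt nums
instance (nums : List Int) (out : Bool) : Decidable (Spec_checkTripleMatch nums out) := by unfold Spec_checkTripleMatch; infer_instance

-- ===== CLAIM (what is proved, stated in full; the proofs are below) =====
def Claim_equal_checkTripleMatch : Prop := ∀ (nums : List Int), Dom_checkTripleMatch nums → Spec_checkTripleMatch nums (checkTripleMatch nums)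

-- ===== LEMMAS AND PROOFS =====

-- abstract form of A's loop: 'seen' is the list of numbers already consumed
def tripleSpec (seen : List Int) : List Int → Bool
  | [] => false
  | n :: rest => seen.any (fun m => n == 3 * m) || tripleSpec (seen ++ [n]) rest

lemma goA_eq_tripleSpec (l : List Int) : ∀ (seen : List Int) (d : PySem.Dict Int Bool),
    (∀ x, d.getD x false = seen.any (fun m => x == 3 * m)) →
    checkTripleMatchGo d l = tripleSpec seen l := by
  induction l with
  | nil => intro seen d _; rfl
  | cons n rest ih =>
      intro seen d hd
      simp only [checkTripleMatchGo, tripleSpec, hd]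
      by_cases h : (seen.any (fun m => n == 3 * m)) = true
      · simp [h]
      · simp only [h, Bool.false_or]
        apply ih (seen ++ [n])
        intro x
        rw [PySem.Dict.getD_insert]
        by_cases hx : x = n * 3
        · simp [hx, mul_comm]
        · simp only [hx, if_false, hd x, List.any_append, List.any_cons, List.any_nil]
          have : (x == 3 * n) = false := by
            simp only [beq_eq_false_iff_ne, ne_eq]
            omega
          simp [this]

lemma tripleSpec_iff (l : List Int) : ∀ seen : List Int,
    tripleSpec seen l = true ↔
      ∃ j : Nat, j < l.length ∧ ∃ m ∈ seen ++ l.take j, l.getD j 0 = 3 * m := by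
  induction l with
  | nil => intro seen; simp [tripleSpec]
  | cons n rest ih =>
      intro seen
      simp only [tripleSpec, Bool.or_eq_true, List.any_eq_true, ih]
      constructor
      · rintro (⟨m, hm, he⟩ | ⟨j, hj, m, hm, he⟩)
        · exact ⟨0, by simp, m, by simpa using hm, by simpa using of_decide_eq_true he⟩
        · refine ⟨j + 1, by simpa using hj, m, ?_, by simpa using he⟩
          simp only [List.take_succ_cons, List.mem_append, List.mem_cons] at hm ⊢
          tauto
      · rintro ⟨j, hj, m, hm, he⟩
        cases j with
        | zero =>
            left
            exact ⟨m, by simpa using hm, by simpa using he⟩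
        | succ j =>
            right
            refine ⟨j, by simpa using hj, m, ?_, by simpa using he⟩
            simp only [List.take_succ_cons, List.mem_append, List.mem_cons] at hm ⊢
            tauto

lemma alt_iff (nums : List Int) :
    checkTripleMatch_alt nums = true ↔
      ∃ j : Nat, j < nums.length ∧ ∃ i : Nat, i < j ∧ nums.getD j 0 = 3 * nums.getD i 0 := by
  simp only [checkTripleMatch_alt, List.any_eq_true, PySem.List.mem_pyRange_one]
  constructor
  · rintro ⟨j, ⟨hj0, hjn⟩, i, ⟨hi0, hij⟩, he⟩
    refine ⟨j.toNat, by omega, i.toNat, by omega, ?_⟩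
    have hj' : j = (j.toNat : Int) := by omega
    have hi' : i = (i.toNat : Int) := by omega
    rw [hj', hi'] at he
    rw [PySem.List.pyGetD_natCast, PySem.List.pyGetD_natCast] at he
    exact of_decide_eq_true he
  · rintro ⟨j, hj, i, hij, he⟩
    refine ⟨(j : Int), ⟨by omega, by omega⟩, (i : Int), ⟨by omega, by exact_mod_cast hij⟩, ?_⟩
    rw [PySem.List.pyGetD_natCast, PySem.List.pyGetD_natCast]
    exact decide_eq_true he

lemma mem_take_iff_getD (l : List Int) (j : Nat) (hj : j < l.length) (m : Int) :
    m ∈ l.take j ↔ ∃ i : Nat, i < j ∧ l.getD i 0 = m := by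
  constructor
  · intro hm
    rw [List.mem_iff_getElem] at hm
    obtain ⟨i, hi, he⟩ := hm
    rw [List.length_take] at hi
    have hil : i < l.length := by omega
    refine ⟨i, by omega, ?_⟩
    rw [List.getD_eq_getElem l 0 hil, ← he, List.getElem_take]
  · rintro ⟨i, hi, he⟩
    have hil : i < l.length := by omega
    rw [List.mem_iff_getElem]
    refine ⟨i, by simp [List.length_take]; omega, ?_⟩
    rw [List.getElem_take, ← List.getD_eq_getElem l 0 hil, he]

-- ===== VERDICT (by name: the statement is the Claim_ definition above) =====
theorem checkTripleMatch_spec : Claim_equal_checkTripleMatch := by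
  intro nums _
  unfold Spec_checkTripleMatch
  rw [checkTripleMatch, goA_eq_tripleSpec nums [] PySem.Dict.empty (by intro x; simp)]
  apply Bool.eq_iff_iff.mpr
  rw [tripleSpec_iff, alt_iff]
  constructor
  · rintro ⟨j, hj, m, hm, he⟩
    simp only [List.nil_append] at hm
    obtain ⟨i, hi, hei⟩ := (mem_take_iff_getD nums j hj m).mp hm
    exact ⟨j, hj, i, hi, by rw [he, hei]⟩
  · rintro ⟨j, hj, i, hi, he⟩
    exact ⟨j, hj, nums.getD i 0, by simpa using (mem_take_iff_getD nums j hj _).mpr ⟨i, hi, rfl⟩, he⟩
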